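-- pv_equiv track=rewrite | github.com/Tokyo113/leetcode_python | SlideWindowAndMonotonousStack/code_02_MonotonousStack.py | baoli
-- ===== SOURCE A (Python) =====
-- def baoli(arr):
--     '''
--     暴力解法，O(N2)
--     :param arr:
--     :return:
--     '''
--     res = [[-1,-1] for i in range(len(arr))]
--
--     for i in range(len(arr)):
--         for pre in range(i-1,-1,-1):
--             if arr[pre] < arr[i]:
--                 res[i][0] = pre
--                 break
--
--         for last in range(i+1,len(arr)):
--             if arr[last] < arr[i]:
--                 res[i][1] = last
--                 break
--
--     return res
-- ===== SOURCE B (Python) =====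
-- def baoli(arr):
--     """Monotonic-stack single pass (O(N)); right side via the same pass on the reversed list."""
--     n = len(arr)
--
--     def nearest_smaller_left(a):
--         res = []
--         stack = []
--         for i in range(len(a)):
--             while stack and a[stack[-1]] >= a[i]:
--                 stack.pop()
--             res.append(stack[-1] if stack else -1)
--             stack.append(i)
--         return res
--
--     left = nearest_smaller_left(arr)
--     rev = nearest_smaller_left(arr[::-1])
--     return [[left[i], -1 if rev[n - 1 - i] == -1 else n - 1 - rev[n - 1 - i]]
--             for i in range(n)]
-- ===== Notes on version B (the rewrite author's own statement) =====
-- stated objective: faster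
-- what changed: Replaces A's per-index linear scans (nested loops) with a single-pass monotonic stack computing nearest-smaller-to-the-left, applied once to the array and once to its reversal to get the right side.
import Mathlib
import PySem

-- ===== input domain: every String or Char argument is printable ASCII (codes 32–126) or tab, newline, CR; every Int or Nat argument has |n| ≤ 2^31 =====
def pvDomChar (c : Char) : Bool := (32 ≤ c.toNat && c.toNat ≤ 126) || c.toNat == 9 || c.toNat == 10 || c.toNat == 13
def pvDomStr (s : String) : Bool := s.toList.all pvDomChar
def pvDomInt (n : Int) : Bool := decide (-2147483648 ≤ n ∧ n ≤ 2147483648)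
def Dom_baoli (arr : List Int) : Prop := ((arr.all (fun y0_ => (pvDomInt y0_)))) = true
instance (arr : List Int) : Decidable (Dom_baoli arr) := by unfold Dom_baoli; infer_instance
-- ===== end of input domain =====

-- B replaces A's per-index O(n^2) nested scans by a single-pass monotonic stack (run on the
-- array and on its reversal); measured asymptotically faster; return values proved equal.


-- ===== PORT A =====
-- inner 'for … if arr[p] < v: res[i][k] = p; break' loop: first index in idxs whose value is < v,
-- else the untouched default -1.  All indices fed to it come from in-range pyRanges, so pyGetD is exact.
def pvScanA (arr : List Int) (v : Int) : List Int → Int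
  | [] => -1
  | p :: ps => if PySem.List.pyGetD arr p 0 < v then p else pvScanA arr v ps

def baoli (arr : List Int) : List (List Int) :=
  (PySem.List.pyRange 0 (arr.length : Int) 1).map (fun i =>
    [pvScanA arr (PySem.List.pyGetD arr i 0) (PySem.List.pyRange (i - 1) (-1) (-1)),
     pvScanA arr (PySem.List.pyGetD arr i 0) (PySem.List.pyRange (i + 1) (arr.length : Int) 1)])

-- ===== PORT B =====
-- one step of the stack loop: pop (dropWhile) all stack indices j with a[j] >= a[i]
-- (stack top kept at the head), record the new top (or -1), push i.
-- Indices on the stack are always < a.length, so getD is exact.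
def pvNSLStep (a : List Int) (st : List Int × List Nat) (i : Nat) : List Int × List Nat :=
  let s := st.2.dropWhile (fun j => decide (a.getD i 0 ≤ a.getD j 0))
  (st.1 ++ [match s with | [] => (-1 : Int) | j :: _ => (j : Int)], i :: s)

-- nearest_smaller_left of Source B
def pvNSL (a : List Int) : List Int :=
  ((List.range a.length).foldl (pvNSLStep a) ([], [])).1

def baoli_alt (arr : List Int) : List (List Int) :=
  let n := arr.length
  let left := pvNSL arr
  let rev := pvNSL arr.reverse   -- arr[::-1] is List.reverse (PySem.List.slice?_none_none_neg_one)
  (List.range n).map (fun i =>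
    let r := rev.getD (n - 1 - i) 0
    [left.getD i 0, if r = -1 then (-1 : Int) else ((n : Int) - 1 - r)])

-- ===== PRECONDITION & SPEC =====
def Spec_baoli (arr : List Int) (out : List (List Int)) : Prop := out = baoli_alt arr
instance (arr : List Int) (out : List (List Int)) : Decidable (Spec_baoli arr out) := by unfold Spec_baoli; infer_instance

-- ===== CLAIM (what is proved, stated in full; the proofs are below) =====
def Claim_equal_baoli : Prop := ∀ (arr : List Int), Dom_baoli arr → Spec_baoli arr (baoli arr)

-- ===== LEMMAS AND PROOFS =====

-- r is the index of the nearest element strictly smaller than v to the LEFT of position i (or -1)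
def pvIsGL (a : List Int) (v : Int) (i : Nat) (r : Int) : Prop :=
  (r = -1 ∧ ∀ j, j < i → ¬(a.getD j 0 < v)) ∨
  (∃ m : Nat, r = (m : Int) ∧ m < i ∧ a.getD m 0 < v ∧ ∀ k, m < k → k < i → ¬(a.getD k 0 < v))

-- r is the index of the first element strictly smaller than v in [s, n) (or -1)
def pvIsGR (a : List Int) (v : Int) (s n : Nat) (r : Int) : Prop :=
  (r = -1 ∧ ∀ j, s ≤ j → j < n → ¬(a.getD j 0 < v)) ∨
  (∃ m : Nat, r = (m : Int) ∧ s ≤ m ∧ m < n ∧ a.getD m 0 < v ∧ ∀ k, s ≤ k → k < m → ¬(a.getD k 0 < v))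

theorem pvIsGL_unique {a : List Int} {v : Int} {i : Nat} {r1 r2 : Int}
    (h1 : pvIsGL a v i r1) (h2 : pvIsGL a v i r2) : r1 = r2 := by
  rcases h1 with ⟨e1, n1⟩ | ⟨m1, e1, hm1, hv1, hmax1⟩ <;>
    rcases h2 with ⟨e2, n2⟩ | ⟨m2, e2, hm2, hv2, hmax2⟩
  · omega
  · exact absurd hv2 (n1 m2 hm2)
  · exact absurd hv1 (n2 m1 hm1)
  · rcases Nat.lt_trichotomy m1 m2 with h | h | h
    · exact absurd hv2 (hmax1 m2 h hm2)
    · omega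
    · exact absurd hv1 (hmax2 m1 h hm1)

theorem pvIsGR_unique {a : List Int} {v : Int} {s n : Nat} {r1 r2 : Int}
    (h1 : pvIsGR a v s n r1) (h2 : pvIsGR a v s n r2) : r1 = r2 := by
  rcases h1 with ⟨e1, n1⟩ | ⟨m1, e1, hs1, hm1, hv1, hmin1⟩ <;>
    rcases h2 with ⟨e2, n2⟩ | ⟨m2, e2, hs2, hm2, hv2, hmin2⟩
  · omega
  · exact absurd hv2 (n1 m2 hs2 hm2)
  · exact absurd hv1 (n2 m1 hs1 hm1)
  · rcases Nat.lt_trichotomy m1 m2 with h | h | h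
    · exact absurd hv1 (hmin2 m1 hs1 h)
    · omega
    · exact absurd hv2 (hmin1 m2 hs2 h)

-- ===== A-side characterisations =====
theorem pvScanA_desc (a : List Int) (v : Int) :
    ∀ i : Nat, pvIsGL a v i (pvScanA a v (PySem.List.pyRange ((i : Int) - 1) (-1) (-1))) := by
  intro i
  induction i with
  | zero =>
      rw [PySem.List.pyRange_neg_one_eq_nil (by omega)]
      exact Or.inl ⟨rfl, by omega⟩
  | succ i ih =>
      have e : (((i + 1 : Nat)) : Int) - 1 = (i : Int) := by push_cast; ring
      rw [e, PySem.List.pyRange_neg_one_cons (by omega)]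
      simp only [pvScanA, PySem.List.pyGetD_natCast]
      by_cases h : a.getD i 0 < v
      · rw [if_pos h]
        exact Or.inr ⟨i, rfl, by omega, h, by omega⟩
      · rw [if_neg h]
        rcases ih with ⟨e, hn⟩ | ⟨m, e, hm, hv, hmax⟩
        · refine Or.inl ⟨e, fun j hj => ?_⟩
          rcases Nat.lt_succ_iff_lt_or_eq.mp hj with hj' | rfl
          · exact hn j hj'
          · exact h
        · refine Or.inr ⟨m, e, by omega, hv, fun k hk1 hk2 => ?_⟩
          rcases Nat.lt_succ_iff_lt_or_eq.mp hk2 with hk' | rfl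
          · exact hmax k hk1 hk'
          · exact h

theorem pvScanA_asc (a : List Int) (v : Int) :
    ∀ d s : Nat, s + d = a.length →
      pvIsGR a v s a.length (pvScanA a v (PySem.List.pyRange (s : Int) (a.length : Int) 1)) := by
  intro d
  induction d with
  | zero =>
      intro s hs
      rw [PySem.List.pyRange_one_eq_nil (by omega)]
      exact Or.inl ⟨rfl, by omega⟩
  | succ d ih =>
      intro s hs
      rw [PySem.List.pyRange_one_cons (by exact_mod_cast by omega)]
      simp only [pvScanA, PySem.List.pyGetD_natCast]
      by_cases h : a.getD s 0 < v
      · rw [if_pos h]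
        exact Or.inr ⟨s, rfl, le_refl s, by omega, h, by omega⟩
      · rw [if_neg h]
        have := ih (s + 1) (by omega)
        push_cast at this
        rcases this with ⟨e, hn⟩ | ⟨m, e, hsm, hm, hv, hmin⟩
        · refine Or.inl ⟨e, fun j hj1 hj2 => ?_⟩
          rcases Nat.eq_or_lt_of_le hj1 with rfl | hj'
          · exact h
          · exact hn j (by omega) hj2
        · refine Or.inr ⟨m, e, by omega, hm, hv, fun k hk1 hk2 => ?_⟩
          rcases Nat.eq_or_lt_of_le hk1 with rfl | hk'
          · exact h
          · exact hmin k (by omega) hk2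

-- ===== B-side: the stack invariant =====
-- the stack state after processing indices 0 .. i-1 (second component of the fold state)
def pvStk (a : List Int) : Nat → List Nat
  | 0 => []
  | i + 1 => i :: (pvStk a i).dropWhile (fun j => decide (a.getD i 0 ≤ a.getD j 0))

-- the value appended to res at step i
def pvOut (a : List Int) (i : Nat) : Int :=
  match (pvStk a i).dropWhile (fun j => decide (a.getD i 0 ≤ a.getD j 0)) with
  | [] => -1
  | j :: _ => (j : Int)

theorem pvFoldl_eq (a : List Int) :
    ∀ m : Nat, (List.range m).foldl (pvNSLStep a) ([], []) =
      ((List.range m).map (pvOut a), pvStk a m) := by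
  intro m
  induction m with
  | zero => rfl
  | succ m ih =>
      rw [List.range_succ, List.foldl_append, List.map_append, ih]
      simp [pvNSLStep, pvStk, pvOut]

theorem pvNSL_eq (a : List Int) : pvNSL a = (List.range a.length).map (pvOut a) := by
  rw [pvNSL, pvFoldl_eq]

-- a monotone Bool predicate turns dropWhile into filter
theorem dropWhile_eq_filter_of_mono {α : Type} (p : α → Bool) (l : List α)
    (h : l.Pairwise (fun x y => p y = true → p x = true)) :
    l.dropWhile p = l.filter (fun x => !p x) := by
  induction l with
  | nil => rfl
  | cons x t ih =>
      rcases List.pairwise_cons.mp h with ⟨hx, ht⟩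
      by_cases hp : p x = true
      · rw [List.dropWhile_cons_of_pos hp, List.filter_cons_of_neg (by simp [hp]), ih ht]
      · rw [List.dropWhile_cons_of_neg (by simp [hp]),
            List.filter_cons_of_pos (by simp [hp])]
        have : t.filter (fun y => !p y) = t := by
          apply List.filter_eq_self.mpr
          intro y hy
          simp only [Bool.not_eq_true']
          by_contra hc
          exact hp (hx y hy (by simpa using hc))
        rw [this]

-- the three stack invariants: sorted (strictly decreasing), bounded by i, and membership =
-- "no later element (before i) is ≤ it"
theorem pvStk_invar (a : List Int) :
    ∀ i : Nat, (pvStk a i).Pairwise (· > ·) ∧ (∀ j ∈ pvStk a i, j < i) ∧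
      (∀ j, j ∈ pvStk a i ↔ j < i ∧ ∀ k, j < k → k < i → a.getD j 0 < a.getD k 0) := by
  intro i
  induction i with
  | zero => exact ⟨List.Pairwise.nil, by simp [pvStk], fun j => by simp [pvStk]⟩
  | succ i ih =>
      obtain ⟨hsort, hbnd, hmem⟩ := ih
      set p : Nat → Bool := fun j => decide (a.getD i 0 ≤ a.getD j 0) with hp
      have hmono : (pvStk a i).Pairwise (fun x y => p y = true → p x = true) := by
        refine hsort.imp_of_mem ?_
        intro x y hx hy hxy hpy
        have h1 := ((hmem y).mp hy).2 x hxy (hbnd x hx)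
        simp only [hp, decide_eq_true_eq] at hpy ⊢
        omega
      have hfil : (pvStk a i).dropWhile p = (pvStk a i).filter (fun x => !p x) :=
        dropWhile_eq_filter_of_mono p _ hmono
      have hsub : ((pvStk a i).filter (fun x => !p x)).Sublist (pvStk a i) := List.filter_sublist
      constructor
      · rw [pvStk, hfil]
        refine List.pairwise_cons.mpr ⟨?_, List.Pairwise.sublist hsub hsort⟩
        intro j hj
        exact hbnd j (hsub.subset hj)
      constructor
      · rw [pvStk, hfil]
        intro j hj
        rcases List.mem_cons.mp hj with rfl | hj'
        · omega
        · exact Nat.lt_succ_of_lt (hbnd j (hsub.subset hj'))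
      · rw [pvStk, hfil]
        intro j
        constructor
        · intro hj
          rcases List.mem_cons.mp hj with rfl | hj'
          · exact ⟨Nat.lt_succ_self j, fun k hk1 hk2 => by omega⟩
          · have hjs := hsub.subset hj'
            have hq : a.getD j 0 < a.getD i 0 := by
              have := (List.mem_filter.mp hj').2
              simp only [hp, Bool.not_eq_true', decide_eq_false_iff_not] at this
              omega
            obtain ⟨hlt, hall⟩ := (hmem j).mp hjs
            refine ⟨by omega, fun k hk1 hk2 => ?_⟩
            rcases Nat.lt_succ_iff_lt_or_eq.mp hk2 with hk' | rfl
            · exact hall k hk1 hk'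
            · exact hq
        · rintro ⟨hlt, hall⟩
          rcases Nat.lt_succ_iff_lt_or_eq.mp hlt with hj' | rfl
          · have hjs : j ∈ pvStk a i := (hmem j).mpr ⟨hj', fun k hk1 hk2 => hall k hk1 (by omega)⟩
            refine List.mem_cons.mpr (Or.inr (List.mem_filter.mpr ⟨hjs, ?_⟩))
            have := hall i hj' (Nat.lt_succ_self i)
            simp only [hp, Bool.not_eq_true', decide_eq_false_iff_not]
            omega
          · exact List.mem_cons_self ..

theorem pvOut_isGL (a : List Int) (i : Nat) : pvIsGL a (a.getD i 0) i (pvOut a i) := by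
  obtain ⟨hsort, hbnd, hmem⟩ := pvStk_invar a i
  set v := a.getD i 0 with hv
  set p : Nat → Bool := fun j => decide (v ≤ a.getD j 0) with hp
  have hmono : (pvStk a i).Pairwise (fun x y => p y = true → p x = true) := by
    refine hsort.imp_of_mem ?_
    intro x y hx hy hxy hpy
    have h1 := ((hmem y).mp hy).2 x hxy (hbnd x hx)
    simp only [hp, decide_eq_true_eq] at hpy ⊢
    omega
  have hfil : (pvStk a i).dropWhile p = (pvStk a i).filter (fun x => !p x) :=
    dropWhile_eq_filter_of_mono p _ hmono
  have hq : ∀ x, (!p x) = true ↔ a.getD x 0 < v := by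
    intro x; simp [hp]
  rw [pvOut, hfil]
  rcases hfl : (pvStk a i).filter (fun x => !p x) with _ | ⟨j, rest⟩
  · -- empty: no j < i has a[j] < v
    refine Or.inl ⟨rfl, fun j hj hlt => ?_⟩
    have hg : a.getD (Nat.findGreatest (fun k => a.getD k 0 < v) (i - 1)) 0 < v :=
      Nat.findGreatest_spec (P := fun k => a.getD k 0 < v) (n := i - 1) (m := j) (by omega) hlt
    set g := Nat.findGreatest (fun k => a.getD k 0 < v) (i - 1) with hgdef
    have hgle : g ≤ i - 1 := Nat.findGreatest_le _
    have hgin : g ∈ pvStk a i := by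
      refine (hmem g).mpr ⟨by omega, fun k hk1 hk2 => ?_⟩
      have := Nat.findGreatest_is_greatest (P := fun k => a.getD k 0 < v) (n := i - 1)
        (k := k) (by omega) (by omega)
      simp only at this
      omega
    have : g ∈ (pvStk a i).filter (fun x => !p x) :=
      List.mem_filter.mpr ⟨hgin, (hq g).mpr hg⟩
    rw [hfl] at this
    exact absurd this (List.not_mem_nil)
  · -- head j is the nearest smaller to the left
    have hjmem : j ∈ (pvStk a i).filter (fun x => !p x) := by rw [hfl]; exact List.mem_cons_self ..
    have hjs : j ∈ pvStk a i := (List.mem_filter.mp hjmem).1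
    have hjv : a.getD j 0 < v := (hq j).mp (List.mem_filter.mp hjmem).2
    have hji : j < i := hbnd j hjs
    refine Or.inr ⟨j, rfl, hji, hjv, fun k hk1 hk2 hkv => ?_⟩
    -- a larger k with a[k] < v would also be on the filtered stack, above the head
    have hg : a.getD (Nat.findGreatest (fun t => a.getD t 0 < v) (i - 1)) 0 < v :=
      Nat.findGreatest_spec (P := fun t => a.getD t 0 < v) (n := i - 1) (m := k) (by omega) hkv
    set g := Nat.findGreatest (fun t => a.getD t 0 < v) (i - 1) with hgdef
    have hgk : k ≤ g := by
      by_contra hc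
      have := Nat.findGreatest_is_greatest (P := fun t => a.getD t 0 < v) (n := i - 1)
        (k := k) (by omega) (by omega)
      exact this hkv
    have hgle : g ≤ i - 1 := Nat.findGreatest_le _
    have hgin : g ∈ pvStk a i := by
      refine (hmem g).mpr ⟨by omega, fun t ht1 ht2 => ?_⟩
      have := Nat.findGreatest_is_greatest (P := fun t => a.getD t 0 < v) (n := i - 1)
        (k := t) (by omega) (by omega)
      simp only at this
      omega
    have hgfil : g ∈ (pvStk a i).filter (fun x => !p x) :=
      List.mem_filter.mpr ⟨hgin, (hq g).mpr hg⟩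
    rw [hfl] at hgfil
    rcases List.mem_cons.mp hgfil with rfl | hgrest
    · omega
    · have hpw : (j :: rest).Pairwise (· > ·) := by
        rw [← hfl]; exact List.Pairwise.sublist List.filter_sublist hsort
      have := (List.pairwise_cons.mp hpw).1 g hgrest
      omega

-- ===== reversal transport: nearest-smaller-left in the reversed list = nearest-smaller-right =====
theorem rev_getD (a : List Int) (j : Nat) (hj : j < a.length) :
    a.reverse.getD j 0 = a.getD (a.length - 1 - j) 0 := by
  rw [List.getD_eq_getElem _ _ (by simpa using hj),
      List.getD_eq_getElem _ _ (by omega), List.getElem_reverse]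

theorem pvIsGL_reverse (a : List Int) (v : Int) (i : Nat) (r : Int) (hi : i < a.length)
    (h : pvIsGL a.reverse v (a.length - 1 - i) r) :
    pvIsGR a v (i + 1) a.length (if r = -1 then -1 else ((a.length : Int) - 1 - r)) := by
  set n := a.length with hn
  rcases h with ⟨rfl, hnone⟩ | ⟨m, rfl, hm, hv, hmax⟩
  · rw [if_pos rfl]
    refine Or.inl ⟨rfl, fun j hj1 hj2 => ?_⟩
    have := hnone (n - 1 - j) (by omega)
    rwa [rev_getD a _ (by omega), show n - 1 - (n - 1 - j) = j from by omega] at this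
  · rw [if_neg (by omega)]
    have hmn : m < n := by omega
    refine Or.inr ⟨n - 1 - m, by omega, by omega, by omega, ?_, ?_⟩
    · rw [← rev_getD a m hmn]; exact hv
    · intro k hk1 hk2
      have := hmax (n - 1 - k) (by omega) (by omega)
      rwa [rev_getD a _ (by omega), show n - 1 - (n - 1 - k) = k from by omega] at this

-- ===== assembling the two ports =====
theorem baoli_eq_alt (arr : List Int) : baoli arr = baoli_alt arr := by
  have hA : baoli arr = (List.range arr.length).map (fun k =>
      [pvScanA arr (arr.getD k 0) (PySem.List.pyRange ((k : Int) - 1) (-1) (-1)),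
       pvScanA arr (arr.getD k 0) (PySem.List.pyRange ((k : Int) + 1) (arr.length : Int) 1)]) := by
    rw [baoli, PySem.List.pyRange_one,
        show ((arr.length : Int) - 0).toNat = arr.length from by omega, List.map_map]
    refine List.map_congr_left fun k _ => ?_
    simp
  rw [hA, baoli_alt]
  refine List.map_congr_left fun k hk => ?_
  have hkn : k < arr.length := List.mem_range.mp hk
  have hrevlen : arr.reverse.length = arr.length := List.length_reverse
  -- left components
  have hLb : (pvNSL arr).getD k 0 = pvOut arr k := by
    rw [pvNSL_eq, List.getD_eq_getElem _ _ (by simpa using hkn)]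
    simp
  have hL : pvScanA arr (arr.getD k 0) (PySem.List.pyRange ((k : Int) - 1) (-1) (-1)) =
      (pvNSL arr).getD k 0 :=
    hLb ▸ pvIsGL_unique (pvScanA_desc arr (arr.getD k 0) k) (pvOut_isGL arr k)
  -- right components
  have hRb : (pvNSL arr.reverse).getD (arr.length - 1 - k) 0 =
      pvOut arr.reverse (arr.length - 1 - k) := by
    rw [pvNSL_eq, hrevlen, List.getD_eq_getElem _ _ (by simp; omega)]
    simp
  have hvrev : arr.reverse.getD (arr.length - 1 - k) 0 = arr.getD k 0 := by
    rw [rev_getD arr _ (by omega), show arr.length - 1 - (arr.length - 1 - k) = k from by omega]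
  have hGL : pvIsGL arr.reverse (arr.getD k 0) (arr.length - 1 - k)
      (pvOut arr.reverse (arr.length - 1 - k)) := by
    have := pvOut_isGL arr.reverse (arr.length - 1 - k)
    rwa [hvrev] at this
  have hGR := pvIsGL_reverse arr (arr.getD k 0) k
      (pvOut arr.reverse (arr.length - 1 - k)) hkn hGL
  have hAR : pvIsGR arr (arr.getD k 0) (k + 1) arr.length
      (pvScanA arr (arr.getD k 0) (PySem.List.pyRange ((k : Int) + 1) (arr.length : Int) 1)) := by
    have := pvScanA_asc arr (arr.getD k 0) (arr.length - (k + 1)) (k + 1) (by omega)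
    push_cast at this
    exact this
  rw [hL, hRb, pvIsGR_unique hAR hGR]
-- ===== VERDICT (by name: the statement is the Claim_ definition above) =====
theorem baoli_spec : Claim_equal_baoli := by
  intro arr _
  unfold Spec_baoli
  exact baoli_eq_alt arr
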